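-- pv_equiv track=rewrite | github.com/myoungseungho/ECS | Servers/BridgeServer/tcp_bridge.py | _get_rep_tier
-- ===== SOURCE A (Python) =====
-- REPUTATION_FACTIONS = {
--     "village_guard": {
--         "name_kr": "마을 수비대",
--         "tiers": [
--             {"name": "neutral",  "name_kr": "중립",     "min": 0},
--             {"name": "friendly", "name_kr": "우호",     "min": 500},
--             {"name": "honored",  "name_kr": "존경",     "min": 2000},
--             {"name": "revered",  "name_kr": "숭배",     "min": 5000},
--             {"name": "exalted",  "name_kr": "숭앙",     "min": 10000},
--         ],
--     },
--     "merchant_guild": {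
--         "name_kr": "상인 조합",
--         "tiers": [
--             {"name": "neutral",  "name_kr": "중립",     "min": 0},
--             {"name": "friendly", "name_kr": "우호",     "min": 500},
--             {"name": "honored",  "name_kr": "존경",     "min": 2000},
--             {"name": "revered",  "name_kr": "숭배",     "min": 5000},
--             {"name": "exalted",  "name_kr": "숭앙",     "min": 10000},
--         ],
--     },
-- }
--
-- def _get_rep_tier(faction, points):
--     """Get reputation tier name for given points."""
--     if faction not in REPUTATION_FACTIONS:
--         return "unknown", 0
--     tiers = REPUTATION_FACTIONS[faction]["tiers"]
--     current_tier = tiers[0]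
--     for tier in tiers:
--         if points >= tier["min"]:
--             current_tier = tier
--     return current_tier["name"], current_tier["min"]
-- ===== SOURCE B (Python) =====
-- REPUTATION_FACTIONS = {
--     "village_guard": {
--         "name_kr": "마을 수비대",
--         "tiers": [
--             {"name": "neutral",  "name_kr": "중립",     "min": 0},
--             {"name": "friendly", "name_kr": "우호",     "min": 500},
--             {"name": "honored",  "name_kr": "존경",     "min": 2000},
--             {"name": "revered",  "name_kr": "숭배",     "min": 5000},
--             {"name": "exalted",  "name_kr": "숭앙",     "min": 10000},
--         ],
--     },
--     "merchant_guild": {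
--         "name_kr": "상인 조합",
--         "tiers": [
--             {"name": "neutral",  "name_kr": "중립",     "min": 0},
--             {"name": "friendly", "name_kr": "우호",     "min": 500},
--             {"name": "honored",  "name_kr": "존경",     "min": 2000},
--             {"name": "revered",  "name_kr": "숭배",     "min": 5000},
--             {"name": "exalted",  "name_kr": "숭앙",     "min": 10000},
--         ],
--     },
-- }
--
-- def _get_rep_tier(faction, points):
--     """Get reputation tier name for given points (binary search over the sorted thresholds)."""
--     info = REPUTATION_FACTIONS.get(faction)
--     if info is None:
--         return "unknown", 0
--     tiers = info["tiers"]
--     # bisect_right over the sorted tier minimums, written out as a binary search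
--     lo, hi = 0, len(tiers)
--     while lo < hi:
--         mid = (lo + hi) // 2
--         if points >= tiers[mid]["min"]:
--             lo = mid + 1
--         else:
--             hi = mid
--     idx = lo - 1 if lo > 0 else 0
--     tier = tiers[idx]
--     return tier["name"], tier["min"]
-- ===== Notes on version B (the rewrite author's own statement) =====
-- stated objective: alternative
-- what changed: Replaces A's linear keep-last scan over the tiers with a hand-written bisect_right binary search over the sorted tier minimums (index clamped to 0 to match the fallback to tiers[0]).
import Mathlib
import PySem

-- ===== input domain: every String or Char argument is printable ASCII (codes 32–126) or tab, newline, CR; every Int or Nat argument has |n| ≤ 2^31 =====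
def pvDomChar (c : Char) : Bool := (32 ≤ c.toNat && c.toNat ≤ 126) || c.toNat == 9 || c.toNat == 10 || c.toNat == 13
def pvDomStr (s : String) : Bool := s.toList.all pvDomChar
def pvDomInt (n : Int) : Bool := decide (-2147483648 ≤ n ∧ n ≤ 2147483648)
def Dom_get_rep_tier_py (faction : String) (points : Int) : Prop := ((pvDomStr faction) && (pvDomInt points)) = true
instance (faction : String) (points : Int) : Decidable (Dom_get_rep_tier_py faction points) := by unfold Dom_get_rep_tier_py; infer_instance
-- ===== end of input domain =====

-- B replaces A's linear keep-last scan with a binary search (bisect_right) over the sorted tier minimums; alternative formulation, same results.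
-- The Korean "name_kr" fields are never read by the function and are omitted from the ports; tiers are (name, min) pairs.

-- ===== PORT A =====
def pvTiers : List (String × Int) :=
  [("neutral", 0), ("friendly", 500), ("honored", 2000), ("revered", 5000), ("exalted", 10000)]

def get_rep_tier_py (faction : String) (points : Int) : String × Int :=
  if !(faction == "village_guard" || faction == "merchant_guild") then ("unknown", 0)
  else
    let tiers := pvTiers
    let current := tiers.foldl (fun cur tier => if points ≥ tier.2 then tier else cur) (tiers.headI)
    (current.1, current.2)

-- ===== PORT B =====
-- the while-loop of Source B's binary search, as recursion on hi - lo
def pvBisect (points : Int) (tiers : List (String × Int)) (lo hi : Nat) : Nat :=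
  if lo < hi then
    let mid := (lo + hi) / 2
    if points ≥ (tiers.getD mid ("", 0)).2 then pvBisect points tiers (mid + 1) hi
    else pvBisect points tiers lo mid
  else lo
termination_by hi - lo
decreasing_by all_goals omega

def get_rep_tier_py_alt (faction : String) (points : Int) : String × Int :=
  if faction == "village_guard" || faction == "merchant_guild" then
    let tiers := pvTiers
    let lo := pvBisect points tiers 0 tiers.length
    let idx := if lo > 0 then lo - 1 else 0
    let tier := tiers.getD idx ("", 0)
    (tier.1, tier.2)
  else ("unknown", 0)

-- ===== PRECONDITION & SPEC =====
def Spec_get_rep_tier_py (faction : String) (points : Int) (out : String × Int) : Prop := out = get_rep_tier_py_alt faction points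
instance (faction : String) (points : Int) (out : String × Int) : Decidable (Spec_get_rep_tier_py faction points out) := by unfold Spec_get_rep_tier_py; infer_instance

-- ===== CLAIM (what is proved, stated in full; the proofs are below) =====
def Claim_equal_get_rep_tier_py : Prop := ∀ (faction : String) (points : Int), Dom_get_rep_tier_py faction points → Spec_get_rep_tier_py faction points (get_rep_tier_py faction points)

-- ===== LEMMAS AND PROOFS =====
lemma pvBisect_eval (points : Int) :
    pvBisect points pvTiers 0 5 =
      if 10000 ≤ points then 5 else if 5000 ≤ points then 4 else if 2000 ≤ points then 3
      else if 500 ≤ points then 2 else if 0 ≤ points then 1 else 0 := by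
  by_cases h1 : (10000:Int) ≤ points <;> by_cases h2 : (5000:Int) ≤ points <;>
    by_cases h3 : (2000:Int) ≤ points <;> by_cases h4 : (500:Int) ≤ points <;>
    by_cases h5 : (0:Int) ≤ points <;>
    first | (exfalso; omega) | (simp_all [pvBisect, pvTiers]; try (split_ifs <;> omega))

lemma pv_fold_eval (points : Int) :
    pvTiers.foldl (fun cur tier => if points ≥ tier.2 then tier else cur) pvTiers.headI =
      if 10000 ≤ points then ("exalted", (10000 : Int)) else if 5000 ≤ points then ("revered", 5000)
      else if 2000 ≤ points then ("honored", 2000) else if 500 ≤ points then ("friendly", 500)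
      else ("neutral", 0) := by
  simp only [pvTiers, List.foldl, List.headI, ge_iff_le]
  split_ifs <;> rfl

lemma pv_main_eq (points : Int) :
    (let tiers := pvTiers
     let current := tiers.foldl (fun cur tier => if points ≥ tier.2 then tier else cur) (tiers.headI)
     ((current.1, current.2) : String × Int)) =
    (let tiers := pvTiers
     let lo := pvBisect points tiers 0 tiers.length
     let idx := if lo > 0 then lo - 1 else 0
     let tier := tiers.getD idx ("", 0)
     (tier.1, tier.2)) := by
  have hlen : pvTiers.length = 5 := rfl
  simp only [hlen, pvBisect_eval, pv_fold_eval]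
  split_ifs <;> first | rfl | (exfalso; omega)

-- ===== VERDICT (by name: the statement is the Claim_ definition above) =====
theorem get_rep_tier_py_spec : Claim_equal_get_rep_tier_py := by
  intro faction points _
  unfold Spec_get_rep_tier_py get_rep_tier_py get_rep_tier_py_alt
  by_cases h1 : faction = "village_guard" <;> by_cases h2 : faction = "merchant_guild" <;>
    simp only [h1, h2, beq_self_eq_true, Bool.true_or, Bool.or_true, Bool.not_true,
      Bool.false_eq_true, if_false, if_true]
  · exact pv_main_eq points
  · exact pv_main_eq points
  · exact pv_main_eq points
  · have e1 : (faction == "village_guard") = false := by simp [h1]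
    have e2 : (faction == "merchant_guild") = false := by simp [h2]
    simp [e1, e2]
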